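-- pv_equiv track=rewrite | github.com/birbalin25/ADF2DB_migrator | tests/test_code_converter.py | compute_execution_order
-- ===== SOURCE A (Python) =====
-- def compute_execution_order(phase_plan_str: str) -> dict:
--     order_map = {}
--     counter = 1
--     if not phase_plan_str:
--         return order_map
--     for segment in phase_plan_str.split(" | "):
--         colon_pos = segment.find(":")
--         if colon_pos == -1:
--             continue
--         entries_str = segment[colon_pos + 1:].strip()
--         for entry in entries_str.split(","):
--             entry = entry.strip()
--             if ":" in entry:
--                 _, comp_name = entry.split(":", 1)
--                 order_map[comp_name.strip()] = counter
--             else: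
--                 order_map[entry.strip()] = counter
--             counter += 1
--     return order_map
-- ===== SOURCE B (Python) =====
-- def compute_execution_order(phase_plan_str: str) -> dict:
--     def entry_name(entry):
--         entry = entry.strip()
--         if ":" in entry:
--             return entry.split(":", 1)[1].strip()
--         return entry
--
--     def collect(segments):
--         if not segments:
--             return []
--         seg = segments[0]
--         pos = seg.find(":")
--         if pos == -1:
--             return collect(segments[1:])
--         return [entry_name(e) for e in seg[pos + 1:].strip().split(",")] + collect(segments[1:])
--
--     names = collect(phase_plan_str.split(" | "))
--     rev = names[::-1]
--     return {k: len(names) - rev.index(k) for k in dict.fromkeys(names)}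
-- ===== Notes on version B (the rewrite author's own statement) =====
-- stated objective: alternative
-- what changed: Replaces A's single stateful pass threading a (dict, counter) through nested loops by a recursive flatten of the plan into the name sequence, then keys from an ordered dedup (dict.fromkeys) and each value computed independently as len(names) - names[::-1].index(k) (the 1-based last occurrence), so no dict is mutated and no counter is threaded while numbering.
import Mathlib
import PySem

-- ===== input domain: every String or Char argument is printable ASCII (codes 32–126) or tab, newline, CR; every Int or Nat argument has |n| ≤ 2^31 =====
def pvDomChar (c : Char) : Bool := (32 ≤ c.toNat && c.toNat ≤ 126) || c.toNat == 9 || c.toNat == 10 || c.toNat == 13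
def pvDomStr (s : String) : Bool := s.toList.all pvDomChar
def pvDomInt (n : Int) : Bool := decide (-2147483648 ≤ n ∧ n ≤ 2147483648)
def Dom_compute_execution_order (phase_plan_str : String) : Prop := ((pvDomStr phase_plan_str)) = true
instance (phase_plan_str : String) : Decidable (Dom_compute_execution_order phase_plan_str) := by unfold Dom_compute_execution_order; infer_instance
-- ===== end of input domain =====

-- B replaces A's stateful dict+counter pass by: recursive flatten into the name sequence,
-- keys from an ordered dedup, values computed independently as len - reverse-index (objective: alternative).


-- ===== PORT A =====
-- Literal port of A. Notes on exactness: `split?` with the non-empty literal separators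
-- " | " / "," is always `some`, so `.getD []` is exact; `_, comp_name = entry.split(":", 1)`
-- runs only when ":" is in `entry`, where the split has exactly two parts, so
-- `pyGetD parts 1 ""` is exact there.
def compute_execution_order (phase_plan_str : String) : List (String × Int) :=
  (if phase_plan_str = "" then (PySem.Dict.empty : PySem.Dict String Int) else
    (((PySem.Str.split? phase_plan_str " | ").getD []).foldl
      (fun (st : PySem.Dict String Int × Int) segment =>
        let colon_pos := PySem.Str.find segment ":"
        if colon_pos = -1 then st
        else
          let entries_str := PySem.Str.strip (PySem.Str.slice segment (some (colon_pos + 1)) none)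
          ((PySem.Str.split? entries_str ",").getD []).foldl
            (fun (st2 : PySem.Dict String Int × Int) entry =>
              let e := PySem.Str.strip entry
              if PySem.Str.isIn ":" e then
                (st2.1.insert (PySem.Str.strip (PySem.List.pyGetD ((PySem.Str.splitMax? e ":" 1).getD []) 1 "")) st2.2, st2.2 + 1)
              else
                (st2.1.insert (PySem.Str.strip e) st2.2, st2.2 + 1)) st)
      ((PySem.Dict.empty : PySem.Dict String Int), (1 : Int))).1).items

-- ===== PORT B =====
-- Literal port of B (same `.getD []` / `pyGetD parts 1 ""` exactness notes as in port A).
-- `entry_name(entry)` of Source B: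
def pvEntryName (entry : String) : String :=
  let e := PySem.Str.strip entry
  if PySem.Str.isIn ":" e then
    PySem.Str.strip (PySem.List.pyGetD ((PySem.Str.splitMax? e ":" 1).getD []) 1 "")
  else e

-- `collect(segments)` of Source B: structural recursion on the segment list.
def pvCollect : List String → List String
  | [] => []
  | seg :: rest =>
    let pos := PySem.Str.find seg ":"
    if pos = -1 then pvCollect rest
    else (((PySem.Str.split? (PySem.Str.strip (PySem.Str.slice seg (some (pos + 1)) none)) ",").getD []).map pvEntryName)
           ++ pvCollect rest

-- `names[::-1]` is `slice? names none none (-1)`, always `some` (step ≠ 0), so `.getD []` is exact;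
-- every key of the comprehension is in `names`, so `index?` is `some` and `.getD 0` is exact.
def compute_execution_order_alt (phase_plan_str : String) : List (String × Int) :=
  let names := pvCollect ((PySem.Str.split? phase_plan_str " | ").getD [])
  let rev := (PySem.List.slice? names none none (-1)).getD []
  (PySem.List.dedup names).map
    (fun k => (k, PySem.List.len names - (((PySem.List.index? rev k).getD 0 : Nat) : Int)))

-- ===== PRECONDITION & SPEC =====
def Spec_compute_execution_order (phase_plan_str : String) (out : List (String × Int)) : Prop := out = compute_execution_order_alt phase_plan_str
instance (phase_plan_str : String) (out : List (String × Int)) : Decidable (Spec_compute_execution_order phase_plan_str out) := by unfold Spec_compute_execution_order; infer_instance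

-- ===== CLAIM (what is proved, stated in full; the proofs are below) =====
def Claim_equal_compute_execution_order : Prop := ∀ (phase_plan_str : String), Dom_compute_execution_order phase_plan_str → Spec_compute_execution_order phase_plan_str (compute_execution_order phase_plan_str)

-- ===== LEMMAS AND PROOFS =====

-- dropWhile is idempotent
theorem pv_dropWhile_idem (p : Char → Bool) (l : List Char) :
    List.dropWhile p (List.dropWhile p l) = List.dropWhile p l := by
  rw [List.dropWhile_eq_self_iff]
  intro hl
  have h := List.head?_dropWhile_not p l
  rw [List.head?_eq_getElem?, List.getElem?_eq_getElem hl] at h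
  simpa using h

-- a prefix of a dropWhile-fixed list is dropWhile-fixed
theorem pv_dropWhile_prefix (p : Char → Bool) {u t : List Char} (hp : u <+: t)
    (ht : List.dropWhile p t = t) : List.dropWhile p u = u := by
  rw [List.dropWhile_eq_self_iff] at *
  intro hu
  have hlt : 0 < t.length := lt_of_lt_of_le hu hp.length_le
  have := ht hlt
  have hg := hp.getElem hu
  rw [hg]
  exact this

theorem pv_chars_strip_strip (s : List Char) :
    PySem.Chars.strip (PySem.Chars.strip s) = PySem.Chars.strip s := by
  simp only [PySem.Chars.strip, PySem.Chars.lstrip, PySem.Chars.rstrip]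
  set p := PySem.Chars.isspace
  set t := List.dropWhile p s with ht
  have htfix : List.dropWhile p t = t := pv_dropWhile_idem p s
  set r := (List.dropWhile p t.reverse).reverse with hr
  have hpre : r <+: t := by
    have hsuf : r.reverse <:+ t.reverse := by
      rw [hr, List.reverse_reverse]
      exact List.dropWhile_suffix p
    exact List.reverse_suffix.mp hsuf
  have hlr : List.dropWhile p r = r := pv_dropWhile_prefix p hpre htfix
  rw [hlr, hr, List.reverse_reverse, pv_dropWhile_idem]

theorem pv_strip_strip (s : String) :
    PySem.Str.strip (PySem.Str.strip s) = PySem.Str.strip s := by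
  have h : (PySem.Str.strip (PySem.Str.strip s)).toList = (PySem.Str.strip s).toList := by
    rw [PySem.Str.toList_strip, PySem.Str.toList_strip, pv_chars_strip_strip]
  exact String.toList_inj.mp h

-- the names one segment contributes
def pvSegNames (segment : String) : List String :=
  if PySem.Str.find segment ":" = -1 then []
  else ((PySem.Str.split? (PySem.Str.strip (PySem.Str.slice segment (some (PySem.Str.find segment ":" + 1)) none)) ",").getD []).map pvEntryName

-- counter-fold: insert each name with the running counter
def pvCF (ns : List String) (st : PySem.Dict String Int × Int) : PySem.Dict String Int × Int :=
  ns.foldl (fun st n => (st.1.insert n st.2, st.2 + 1)) st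

theorem pvCF_nil (st : PySem.Dict String Int × Int) : pvCF [] st = st := rfl

theorem pvCF_cons (n : String) (ns : List String) (st : PySem.Dict String Int × Int) :
    pvCF (n :: ns) st = pvCF ns (st.1.insert n st.2, st.2 + 1) := rfl

theorem pvCF_append (ns ms : List String) (st : PySem.Dict String Int × Int) :
    pvCF (ns ++ ms) st = pvCF ms (pvCF ns st) := by
  simp [pvCF, List.foldl_append]

-- A's inner entry loop is the counter-fold over the mapped names
theorem pv_inner_eq (entries : List String) (st : PySem.Dict String Int × Int) :
    entries.foldl
      (fun (st2 : PySem.Dict String Int × Int) entry =>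
        let e := PySem.Str.strip entry
        if PySem.Str.isIn ":" e then
          (st2.1.insert (PySem.Str.strip (PySem.List.pyGetD ((PySem.Str.splitMax? e ":" 1).getD []) 1 "")) st2.2, st2.2 + 1)
        else
          (st2.1.insert (PySem.Str.strip e) st2.2, st2.2 + 1)) st
    = pvCF (entries.map pvEntryName) st := by
  induction entries generalizing st with
  | nil => rw [List.foldl_nil, List.map_nil, pvCF_nil]
  | cons n rest ih =>
    rw [List.foldl_cons, ih, List.map_cons, pvCF_cons]
    refine congrArg _ ?_
    show (if PySem.Str.isIn ":" (PySem.Str.strip n) = true then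
            (st.1.insert (PySem.Str.strip (PySem.List.pyGetD ((PySem.Str.splitMax? (PySem.Str.strip n) ":" 1).getD []) 1 "")) st.2, st.2 + 1)
          else (st.1.insert (PySem.Str.strip (PySem.Str.strip n)) st.2, st.2 + 1))
        = (st.1.insert (pvEntryName n) st.2, st.2 + 1)
    have hn : pvEntryName n = (if PySem.Str.isIn ":" (PySem.Str.strip n) = true then
            PySem.Str.strip (PySem.List.pyGetD ((PySem.Str.splitMax? (PySem.Str.strip n) ":" 1).getD []) 1 "")
          else PySem.Str.strip n) := rfl
    rw [hn, pv_strip_strip]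
    by_cases hc : PySem.Str.isIn ":" (PySem.Str.strip n) = true
    · rw [if_pos hc, if_pos hc]
    · rw [if_neg hc, if_neg hc]

-- A's outer segment loop is the counter-fold over the flattened names
theorem pv_outer_eq (segments : List String) (st : PySem.Dict String Int × Int) :
    segments.foldl
      (fun (st : PySem.Dict String Int × Int) segment =>
        let colon_pos := PySem.Str.find segment ":"
        if colon_pos = -1 then st
        else
          let entries_str := PySem.Str.strip (PySem.Str.slice segment (some (colon_pos + 1)) none)
          ((PySem.Str.split? entries_str ",").getD []).foldl
            (fun (st2 : PySem.Dict String Int × Int) entry =>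
              let e := PySem.Str.strip entry
              if PySem.Str.isIn ":" e then
                (st2.1.insert (PySem.Str.strip (PySem.List.pyGetD ((PySem.Str.splitMax? e ":" 1).getD []) 1 "")) st2.2, st2.2 + 1)
              else
                (st2.1.insert (PySem.Str.strip e) st2.2, st2.2 + 1)) st) st
    = pvCF (segments.flatMap pvSegNames) st := by
  induction segments generalizing st with
  | nil => rw [List.foldl_nil, List.flatMap_nil, pvCF_nil]
  | cons seg rest ih =>
    rw [List.foldl_cons, ih, List.flatMap_cons, pvCF_append]
    refine congrArg _ ?_
    show (if PySem.Str.find seg ":" = -1 then st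
          else ((PySem.Str.split? (PySem.Str.strip (PySem.Str.slice seg (some (PySem.Str.find seg ":" + 1)) none)) ",").getD []).foldl
            (fun (st2 : PySem.Dict String Int × Int) entry =>
              let e := PySem.Str.strip entry
              if PySem.Str.isIn ":" e then
                (st2.1.insert (PySem.Str.strip (PySem.List.pyGetD ((PySem.Str.splitMax? e ":" 1).getD []) 1 "")) st2.2, st2.2 + 1)
              else
                (st2.1.insert (PySem.Str.strip e) st2.2, st2.2 + 1)) st)
        = pvCF (pvSegNames seg) st
    have hs : pvSegNames seg = (if PySem.Str.find seg ":" = -1 then [] else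
        ((PySem.Str.split? (PySem.Str.strip (PySem.Str.slice seg (some (PySem.Str.find seg ":" + 1)) none)) ",").getD []).map pvEntryName) := rfl
    rw [hs]
    by_cases hc : PySem.Str.find seg ":" = -1
    · rw [if_pos hc, if_pos hc, pvCF_nil]
    · rw [if_neg hc, if_neg hc, pv_inner_eq]

-- B's recursive collect is the flattened-name list
theorem pv_collect_eq (segments : List String) :
    pvCollect segments = segments.flatMap pvSegNames := by
  induction segments with
  | nil => rfl
  | cons seg rest ih =>
    rw [List.flatMap_cons, ← ih]
    show (if PySem.Str.find seg ":" = -1 then pvCollect rest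
          else (((PySem.Str.split? (PySem.Str.strip (PySem.Str.slice seg (some (PySem.Str.find seg ":" + 1)) none)) ",").getD []).map pvEntryName) ++ pvCollect rest)
        = pvSegNames seg ++ pvCollect rest
    have hs : pvSegNames seg = (if PySem.Str.find seg ":" = -1 then [] else
        ((PySem.Str.split? (PySem.Str.strip (PySem.Str.slice seg (some (PySem.Str.find seg ":" + 1)) none)) ",").getD []).map pvEntryName) := rfl
    rw [hs]
    by_cases hc : PySem.Str.find seg ":" = -1
    · rw [if_pos hc, if_pos hc, List.nil_append]
    · rw [if_neg hc, if_neg hc]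

-- the counter-fold from counter c is the enumerate(·, c) insertion fold
theorem pv_CF_enumerate (ns : List String) (d : PySem.Dict String Int) (c : Int) :
    (pvCF ns (d, c)).1
      = (PySem.List.enumerate ns c).foldl (fun d p => d.insert p.2 p.1) d := by
  induction ns generalizing d c with
  | nil => rfl
  | cons n rest ih =>
    rw [pvCF_cons, PySem.List.enumerate_cons, List.foldl_cons]
    exact ih (d.insert n c) (c + 1)

-- the enumerate-insert fold from empty, abbreviated
def pvF (ns : List String) : PySem.Dict String Int :=
  (PySem.List.enumerate ns 1).foldl (fun d p => d.insert p.2 p.1) PySem.Dict.empty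

theorem pvF_keys (ns : List String) : (pvF ns).keys = PySem.List.dedup ns := by
  unfold pvF
  rw [PySem.Dict.keys_foldl_insert_key (PySem.List.enumerate ns 1) (fun p => p.2) (fun _ p => p.1) PySem.Dict.empty]
  rw [PySem.List.map_snd_enumerate]
  simp [PySem.Set.update, PySem.Set.ofList_eq_foldl, PySem.Dict.keys_empty]

-- MAIN LEMMA: the items of A's last-wins insertion fold are B's dedup-keys with
-- (1-based) last-occurrence values
theorem pv_items_eq (ns : List String) :
    (pvF ns).items
      = (PySem.List.dedup ns).map
          (fun k => (k, (ns.length : Int) - (((PySem.List.index? ns.reverse k).getD 0 : Nat) : Int))) := by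
  induction ns using List.reverseRecOn with
  | nil => rfl
  | append_singleton ns m ih =>
    have hstep : pvF (ns ++ [m]) = (pvF ns).insert m (1 + (ns.length : Int)) := by
      unfold pvF
      rw [PySem.List.enumerate_append, List.foldl_append]
      rfl
    have hrev : (ns ++ [m]).reverse = m :: ns.reverse := by
      simp
    have hcont : (pvF ns).contains m = decide (m ∈ ns) := by
      rw [PySem.Dict.contains_eq_decide_mem_keys, pvF_keys]
      simp
    by_cases hm : m ∈ ns
    · -- overwrite case
      have hded : PySem.List.dedup (ns ++ [m]) = PySem.List.dedup ns := by
        simp only [PySem.List.dedup_eq_ofList, PySem.Set.ofList_eq_foldl, List.foldl_append]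
        show PySem.Set.add _ m = _
        rw [PySem.Set.add]
        have : PySem.Set.contains (List.foldl PySem.Set.add [] ns) m = true := by
          have : m ∈ PySem.Set.ofList ns := by
            rw [PySem.Set.mem_ofList]; exact hm
          simpa [PySem.Set.ofList_eq_foldl, PySem.Set.contains] using this
        rw [this]; rfl
      rw [hstep, PySem.Dict.items_insert_of_contains _ _ (by rw [hcont]; simpa using hm),
          ih, hded, List.map_map]
      refine List.map_congr_left ?_
      intro k hk
      have hkns : k ∈ ns := (PySem.List.mem_dedup ns k).mp hk
      by_cases hkm : k = m
      · subst hkm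
        simp only [Function.comp, beq_self_eq_true, if_true]
        rw [hrev, PySem.List.index?_cons_self]
        simp
        ring
      · simp only [Function.comp]
        rw [if_neg (by simp [hkm])]
        rw [hrev, PySem.List.index?_cons_of_ne _ (Ne.symm hkm)]
        have hmem : k ∈ ns.reverse := by simpa using hkns
        obtain ⟨i, hi⟩ := Option.isSome_iff_exists.mp ((PySem.List.index?_isSome_iff _ _).mpr hmem)
        rw [hi]
        simp
    · -- fresh-key case
      have hded : PySem.List.dedup (ns ++ [m]) = PySem.List.dedup ns ++ [m] := by
        simp only [PySem.List.dedup_eq_ofList, PySem.Set.ofList_eq_foldl, List.foldl_append]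
        show PySem.Set.add _ m = _
        rw [PySem.Set.add]
        have : PySem.Set.contains (List.foldl PySem.Set.add [] ns) m = false := by
          have : m ∉ PySem.Set.ofList ns := by
            rw [PySem.Set.mem_ofList]; exact hm
          simpa [PySem.Set.ofList_eq_foldl, PySem.Set.contains] using this
        rw [this]; rfl
      rw [hstep, PySem.Dict.items_insert_of_not_contains _ _ (by rw [hcont]; simpa using hm),
          ih, hded, List.map_append]
      congr 1
      · refine List.map_congr_left ?_
        intro k hk
        have hkns : k ∈ ns := (PySem.List.mem_dedup ns k).mp hk
        have hkm : k ≠ m := fun h => hm (h ▸ hkns)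
        rw [hrev, PySem.List.index?_cons_of_ne _ (Ne.symm hkm)]
        have hmem : k ∈ ns.reverse := by simpa using hkns
        obtain ⟨i, hi⟩ := Option.isSome_iff_exists.mp ((PySem.List.index?_isSome_iff _ _).mpr hmem)
        rw [hi]
        simp
      · rw [hrev, List.map_singleton, PySem.List.index?_cons_self]
        simp
        ring

-- ===== VERDICT (by name: the statement is the Claim_ definition above) =====
theorem compute_execution_order_spec : Claim_equal_compute_execution_order := by
  intro s _
  unfold Spec_compute_execution_order compute_execution_order compute_execution_order_alt
  by_cases h : s = ""
  · subst h; decide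
  · rw [if_neg h]
    rw [pv_outer_eq, pv_CF_enumerate, pv_collect_eq]
    rw [show ((PySem.List.enumerate (((PySem.Str.split? s " | ").getD []).flatMap pvSegNames) 1).foldl
          (fun d p => d.insert p.2 p.1) PySem.Dict.empty)
        = pvF (((PySem.Str.split? s " | ").getD []).flatMap pvSegNames) from rfl]
    rw [pv_items_eq]
    simp [PySem.List.slice?_none_none_neg_one, PySem.List.len_eq]
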